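-- pv_equiv track=rewrite | github.com/SuyeonChoi/Algorithms | Programmers/[월간 코드 챌린지]/season1_nov_2.py | solution
-- ===== SOURCE A (Python) =====
-- def solution(s):
--     s = list(map(int, s))
--     cnt, zero = 0, 0
--     while s != [1]:
--         cnt += 1
--         tmp = list(filter(lambda x: x != 0, s))
--         zero += (len(s) - len(tmp))
--         s = tmp
--         s = list(map(int, list(bin(len(s)))[2:]))
--
--     answer = [cnt, zero]
--     return answer
-- ===== SOURCE B (Python) =====
-- def solution(s):
--     vals = [int(c) for c in s]
--     if vals == [1]:
--         return [0, 0]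
--     n = sum(1 for v in vals if v != 0)
--     # bottom-up DP: for every m in 1..n tabulate popcount, bit length and the
--     # (steps, zeros) needed to collapse m down to 1; then read the answer off the table
--     pop = [0] * (n + 1)
--     bl = [0] * (n + 1)
--     steps = [0] * (n + 1)
--     zeros = [0] * (n + 1)
--     for m in range(1, n + 1):
--         pop[m] = pop[m // 2] + m % 2
--         bl[m] = bl[m // 2] + 1
--         if m >= 2:
--             steps[m] = steps[pop[m]] + 1
--             zeros[m] = zeros[pop[m]] + bl[m] - pop[m]
--     return [1 + steps[n], len(vals) - n + zeros[n]]
-- ===== Notes on version B (the rewrite author's own statement) =====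
-- stated objective: alternative
-- what changed: B replaces A's while-loop that repeatedly rebuilds the digit list (filter zeros, bin(), re-parse) by a bottom-up dynamic-programming pass: one for-loop tabulates popcount, bit length and the (steps, zeros)-to-collapse-to-1 for every m up to the first-round nonzero count, and the answer is read off the tables.
import Mathlib
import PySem

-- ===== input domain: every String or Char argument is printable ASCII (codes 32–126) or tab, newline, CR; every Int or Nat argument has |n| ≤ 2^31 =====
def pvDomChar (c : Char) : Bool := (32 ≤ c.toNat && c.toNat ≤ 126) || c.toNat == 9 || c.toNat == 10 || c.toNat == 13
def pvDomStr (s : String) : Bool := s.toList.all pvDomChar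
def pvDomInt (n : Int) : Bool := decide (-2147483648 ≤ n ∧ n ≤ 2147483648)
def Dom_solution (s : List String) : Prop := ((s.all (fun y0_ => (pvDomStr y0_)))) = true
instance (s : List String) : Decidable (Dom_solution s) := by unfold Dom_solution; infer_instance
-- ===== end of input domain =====

-- B replaces A's iterated reduce-to-popcount while-loop by one bottom-up DP tabulation pass;
-- return-value equivalence only (neither version mutates its argument observably).

-- ===== PORT A =====
-- list(bin(m))[2:] mapped through int, for m ≥ 1: MSB-first binary digits
def pvBits : Nat → List Int
  | 0 => []
  | m+1 => pvBits ((m+1)/2) ++ [(((m+1) % 2 : Nat) : Int)]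

-- list(map(int, list(bin(m))[2:])) including bin(0) = '0b0'
def pvBinList (m : Nat) : List Int := if m = 0 then [0] else pvBits m

-- A's while loop; the fuel only makes the recursion total — inside Pre_ it is never exhausted
def pvLoopA : Nat → List Int → Int → Int → List Int
  | 0, _, cnt, zero => [cnt, zero]
  | fuel+1, s, cnt, zero =>
    if s = [1] then [cnt, zero]
    else
      let tmp := s.filter (fun x => x != 0)
      pvLoopA fuel (pvBinList tmp.length) (cnt + 1)
        (zero + ((s.length : Int) - (tmp.length : Int)))

-- int(t): the .getD 0 branch is reached only outside Pre_ (Python raises ValueError there)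
def solution (s : List String) : List Int :=
  let vals := s.map (fun t => (PySem.Int.ofStr? t).getD 0)
  pvLoopA (s.length + 2) vals 0 0

-- ===== PORT B =====
-- the body of Source B's "for m in range(1, n+1)": index assignments become List.set;
-- every Python index read is in range, so getD never takes its default inside the loop
def pvUpd (st : List Nat × List Nat × List Int × List Int) (m : Nat) :
    List Nat × List Nat × List Int × List Int :=
  let pop := st.1.set m (st.1.getD (m/2) 0 + m % 2)
  let bl := st.2.1.set m (st.2.1.getD (m/2) 0 + 1)
  if 2 ≤ m then
    let p := pop.getD m 0
    let steps := st.2.2.1.set m (st.2.2.1.getD p 0 + 1)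
    let zeros := st.2.2.2.set m (st.2.2.2.getD p 0 + ((bl.getD m 0 : Int) - (p : Int)))
    (pop, bl, steps, zeros)
  else (pop, bl, st.2.2.1, st.2.2.2)

def solution_alt (s : List String) : List Int :=
  let vals := s.map (fun t => (PySem.Int.ofStr? t).getD 0)
  if vals = [1] then [0, 0]
  else
    let n := vals.countP (fun v => v != 0)
    let st := (List.range' 1 n).foldl pvUpd
      (List.replicate (n+1) 0, List.replicate (n+1) 0,
       List.replicate (n+1) (0 : Int), List.replicate (n+1) (0 : Int))
    [1 + st.2.2.1.getD n 0, ((vals.length : Int) - (n : Int)) + st.2.2.2.getD n 0]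

-- ===== PRECONDITION & SPEC =====
-- Pre_ excludes exactly the inputs on which A never returns: a string int() rejects
-- (ValueError) and lists whose parsed values are all zero (A's while loop never terminates).
def Pre_solution (s : List String) : Prop :=
  (∀ t ∈ s, (PySem.Int.ofStr? t).isSome) ∧ (∃ t ∈ s, PySem.Int.ofStr? t ≠ some 0)
instance (s : List String) : Decidable (Pre_solution s) := by unfold Pre_solution; infer_instance
def pvWitness_solution : List String := (["1", "0"])

def Spec_solution (s : List String) (out : List Int) : Prop := out = solution_alt s
instance (s : List String) (out : List Int) : Decidable (Spec_solution s out) := by unfold Spec_solution; infer_instance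

-- ===== CLAIM (what is proved, stated in full; the proofs are below) =====
def Claim_equal_solution : Prop := ∀ (s : List String), Dom_solution s → Pre_solution s → Spec_solution s (solution s)

-- ===== LEMMAS AND PROOFS =====

-- mathematical popcount / bit length, used only by the proofs
def pvPopcount : Nat → Nat
  | 0 => 0
  | m+1 => pvPopcount ((m+1)/2) + (m+1) % 2

def pvBitLength : Nat → Nat
  | 0 => 0
  | m+1 => pvBitLength ((m+1)/2) + 1

theorem pvPopcount_pos : ∀ m, 1 ≤ m → 1 ≤ pvPopcount m := by
  intro m
  induction m using Nat.strong_induction_on with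
  | _ m ih =>
    cases m with
    | zero => omega
    | succ k =>
      intro _
      rcases Nat.mod_two_eq_zero_or_one (k+1) with h | h
      · have h2 : 1 ≤ (k+1)/2 := by omega
        have := ih ((k+1)/2) (by omega) h2
        simp [pvPopcount]
        omega
      · simp [pvPopcount, h]

theorem pvPopcount_lt : ∀ m, 2 ≤ m → pvPopcount m < m := by
  intro m
  induction m using Nat.strong_induction_on with
  | _ m ih =>
    intro hm
    match m, hm with
    | k+1, hm =>
      by_cases h2 : 2 ≤ (k+1)/2
      · have := ih ((k+1)/2) (by omega) h2
        simp only [pvPopcount]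
        omega
      · have h1 : (k+1)/2 ≤ 1 := by omega
        have hp : pvPopcount ((k+1)/2) ≤ 1 := by
          interval_cases (k+1)/2 <;> simp [pvPopcount]
        simp only [pvPopcount]
        omega

-- steps/zeros needed to collapse n down to 1 along the popcount chain
def pvS (n : Nat) : Nat :=
  if _h : n ≤ 1 then 0 else pvS (pvPopcount n) + 1
termination_by n
decreasing_by exact pvPopcount_lt n (by omega)

def pvZ (n : Nat) : Int :=
  if _h : n ≤ 1 then 0 else pvZ (pvPopcount n) + ((pvBitLength n : Int) - (pvPopcount n : Int))
termination_by n
decreasing_by exact pvPopcount_lt n (by omega)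

theorem pvS_le : ∀ n, pvS n ≤ n - 1 := by
  intro n
  induction n using Nat.strong_induction_on with
  | _ n ih =>
    by_cases h : n ≤ 1
    · rw [pvS, dif_pos h]; omega
    · rw [pvS, dif_neg h]
      have hlt := pvPopcount_lt n (by omega)
      have := ih (pvPopcount n) hlt
      omega

theorem pvBits_length : ∀ m, (pvBits m).length = pvBitLength m := by
  intro m
  induction m using Nat.strong_induction_on with
  | _ m ih =>
    match m with
    | 0 => simp [pvBits, pvBitLength]
    | k+1 => simp [pvBits, pvBitLength, ih ((k+1)/2) (by omega)]

theorem pvBits_filter_length :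
    ∀ m, ((pvBits m).filter (fun x => x != 0)).length = pvPopcount m := by
  intro m
  induction m using Nat.strong_induction_on with
  | _ m ih =>
    match m with
    | 0 => simp [pvBits, pvPopcount]
    | k+1 =>
      rcases Nat.mod_two_eq_zero_or_one (k+1) with h | h <;>
        simp [pvBits, pvPopcount, List.filter_append, h, ih ((k+1)/2) (by omega)]

theorem pvBitLength_pos : ∀ m, 1 ≤ m → 1 ≤ pvBitLength m := by
  intro m hm
  cases m with
  | zero => omega
  | succ k => simp [pvBitLength]

theorem pvBits_eq_one_iff : ∀ m, 1 ≤ m → (pvBits m = [1] ↔ m = 1) := by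
  intro m hm
  constructor
  · intro h
    by_contra hne
    have h2 : 2 ≤ m := by omega
    have hlen : (pvBits m).length = pvBitLength m := pvBits_length m
    have : 2 ≤ pvBitLength m := by
      match m, h2 with
      | k+1, h2 =>
        have : 1 ≤ (k+1)/2 := by omega
        have := pvBitLength_pos ((k+1)/2) this
        simp [pvBitLength]; omega
    rw [h] at hlen
    simp at hlen
    omega
  · intro h; subst h; simp [pvBits]

theorem pvLoopA_step (f : Nat) (s : List Int) (cnt zero : Int) :
    pvLoopA (f+1) s cnt zero =
      if s = [1] then [cnt, zero]
      else pvLoopA f (pvBinList (s.filter (fun x => x != 0)).length) (cnt + 1)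
        (zero + ((s.length : Int) - ((s.filter (fun x => x != 0)).length : Int))) := by
  simp [pvLoopA]

-- A's loop, started on the binary digits of n ≥ 1 with enough fuel, computes the chain totals
theorem pvLoopA_closed : ∀ n, 1 ≤ n → ∀ fuel cnt zero, pvS n < fuel →
    pvLoopA fuel (pvBinList n) cnt zero = [cnt + (pvS n : Int), zero + pvZ n] := by
  intro n
  induction n using Nat.strong_induction_on with
  | _ n ih =>
    intro hn fuel cnt zero hfuel
    obtain ⟨f, rfl⟩ : ∃ f, fuel = f + 1 := ⟨fuel - 1, by omega⟩
    have hbin : pvBinList n = pvBits n := by unfold pvBinList; rw [if_neg (by omega)]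
    rw [hbin, pvLoopA_step]
    by_cases h1 : n = 1
    · subst h1
      rw [if_pos (by simp [pvBits])]
      rw [pvS, dif_pos (by omega), pvZ, dif_pos (by omega)]
      norm_num
    · have hne : pvBits n ≠ [1] := fun h => h1 ((pvBits_eq_one_iff n hn).mp h)
      rw [if_neg hne, pvBits_filter_length, pvBits_length]
      have hp := pvPopcount_lt n (by omega)
      have hppos := pvPopcount_pos n hn
      have hSn : pvS n = pvS (pvPopcount n) + 1 := by rw [pvS, dif_neg (by omega)]
      have hZn : pvZ n = pvZ (pvPopcount n) + ((pvBitLength n : Int) - (pvPopcount n : Int)) := by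
        rw [pvZ, dif_neg (by omega)]
      rw [ih (pvPopcount n) hp hppos f (cnt + 1) _ (by omega)]
      rw [hSn, hZn]
      simp only [List.cons.injEq, and_true]
      exact ⟨by push_cast; ring, by ring⟩

-- getD through List.set
theorem pv_getD_set_eq {α : Type} (l : List α) (i : Nat) (v d : α) (h : i < l.length) :
    (l.set i v).getD i d = v := by
  simp [List.getD_eq_getElem?_getD, h]

theorem pv_getD_set_ne {α : Type} (l : List α) {i j : Nat} (v d : α) (h : i ≠ j) :
    (l.set i v).getD j d = l.getD j d := by
  simp [List.getD_eq_getElem?_getD, h]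

-- invariant of B's tabulation loop after processing 1..m
def pvInv (n m : Nat) (st : List Nat × List Nat × List Int × List Int) : Prop :=
  st.1.length = n+1 ∧ st.2.1.length = n+1 ∧ st.2.2.1.length = n+1 ∧ st.2.2.2.length = n+1 ∧
  (∀ k, k ≤ m → st.1.getD k 0 = pvPopcount k ∧ st.2.1.getD k 0 = pvBitLength k ∧
     st.2.2.1.getD k 0 = (pvS k : Int) ∧ st.2.2.2.getD k 0 = pvZ k) ∧
  (∀ k, m < k → st.2.2.1.getD k 0 = 0 ∧ st.2.2.2.getD k 0 = 0)

theorem pvPopcount_half (m : Nat) (h : 1 ≤ m) :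
    pvPopcount m = pvPopcount (m/2) + m % 2 := by
  match m, h with
  | k+1, _ => simp [pvPopcount]

theorem pvBitLength_half (m : Nat) (h : 1 ≤ m) :
    pvBitLength m = pvBitLength (m/2) + 1 := by
  match m, h with
  | k+1, _ => simp [pvBitLength]

theorem pvInv_step (n m : Nat) (st : List Nat × List Nat × List Int × List Int)
    (hmn : m + 1 ≤ n) (hI : pvInv n m st) : pvInv n (m+1) (pvUpd st (m+1)) := by
  obtain ⟨h1, h2, h3, h4, hk, hz⟩ := hI
  have hhalf : (m+1)/2 ≤ m := by omega
  have hpopRead := (hk ((m+1)/2) hhalf).1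
  have hblRead := (hk ((m+1)/2) hhalf).2.1
  have hmlt1 : m + 1 < st.1.length := by omega
  have hmlt2 : m + 1 < st.2.1.length := by omega
  have hmlt3 : m + 1 < st.2.2.1.length := by omega
  have hmlt4 : m + 1 < st.2.2.2.length := by omega
  have hpopNew : (st.1.set (m+1) (st.1.getD ((m+1)/2) 0 + (m+1) % 2)).getD (m+1) 0
      = pvPopcount (m+1) := by
    rw [pv_getD_set_eq _ _ _ _ hmlt1, hpopRead, ← pvPopcount_half (m+1) (by omega)]
  have hblNew : (st.2.1.set (m+1) (st.2.1.getD ((m+1)/2) 0 + 1)).getD (m+1) 0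
      = pvBitLength (m+1) := by
    rw [pv_getD_set_eq _ _ _ _ hmlt2, hblRead, ← pvBitLength_half (m+1) (by omega)]
  unfold pvUpd
  by_cases hge : 2 ≤ m + 1
  · rw [if_pos hge]
    have hp := pvPopcount_lt (m+1) hge
    have hppos := pvPopcount_pos (m+1) (by omega)
    have hpm : pvPopcount (m+1) ≤ m := by omega
    have hstepsRead := (hk (pvPopcount (m+1)) hpm).2.2.1
    have hzerosRead := (hk (pvPopcount (m+1)) hpm).2.2.2
    have hSstep : pvS (m+1) = pvS (pvPopcount (m+1)) + 1 := by
      rw [pvS]; rw [dif_neg (by omega)]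
    have hZstep : pvZ (m+1) = pvZ (pvPopcount (m+1))
        + ((pvBitLength (m+1) : Int) - (pvPopcount (m+1) : Int)) := by
      rw [pvZ]; rw [dif_neg (by omega)]
    refine ⟨by simp [h1], by simp [h2], by simp [h3], by simp [h4], ?_, ?_⟩
    · intro k hkm
      by_cases hkeq : k = m + 1
      · subst hkeq
        refine ⟨hpopNew, hblNew, ?_, ?_⟩
        · rw [hpopNew, pv_getD_set_eq _ _ _ _ hmlt3, hstepsRead, hSstep]
          push_cast; ring
        · rw [hpopNew, hblNew, pv_getD_set_eq _ _ _ _ hmlt4, hzerosRead, hZstep]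
      · have hkle : k ≤ m := by omega
        have hne : m + 1 ≠ k := by omega
        rw [hpopNew, pv_getD_set_ne _ _ _ hne, pv_getD_set_ne _ _ _ hne,
          pv_getD_set_ne _ _ _ hne, pv_getD_set_ne _ _ _ hne]
        exact hk k hkle
    · intro k hkgt
      have hne : m + 1 ≠ k := by omega
      rw [hpopNew, pv_getD_set_ne _ _ _ hne, pv_getD_set_ne _ _ _ hne]
      exact hz k (by omega)
  · rw [if_neg hge]
    have hm0 : m = 0 := by omega
    subst hm0
    refine ⟨by simp [h1], by simp [h2], h3, h4, ?_, ?_⟩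
    · intro k hkm
      interval_cases k
      · have hne : (1 : Nat) ≠ 0 := by omega
        rw [pv_getD_set_ne _ _ _ hne, pv_getD_set_ne _ _ _ hne]
        exact hk 0 (by omega)
      · refine ⟨hpopNew, hblNew, ?_, ?_⟩
        · rw [pvS, dif_pos (by omega)]; exact_mod_cast (hz 1 (by omega)).1
        · rw [pvZ, dif_pos (by omega)]; exact (hz 1 (by omega)).2
    · intro k hkgt
      exact hz k (by omega)

theorem pvInv_fold (n : Nat) : ∀ m, m ≤ n →
    pvInv n m ((List.range' 1 m).foldl pvUpd
      (List.replicate (n+1) 0, List.replicate (n+1) 0,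
       List.replicate (n+1) (0 : Int), List.replicate (n+1) (0 : Int))) := by
  intro m
  induction m with
  | zero =>
    intro _
    simp only [List.range'_zero, List.foldl_nil]
    refine ⟨by simp, by simp, by simp, by simp, ?_, ?_⟩
    · intro k hk0
      have : k = 0 := by omega
      subst this
      refine ⟨?_, ?_, ?_, ?_⟩ <;>
        simp [pvPopcount, pvBitLength, pvS, pvZ]
    · intro k _
      constructor <;>
      · simp only [List.getD_eq_getElem?_getD, List.getElem?_replicate]
        split <;> rfl
  | succ m ih =>
    intro hmn
    rw [List.range'_concat, List.foldl_append]
    simp only [List.foldl_cons, List.foldl_nil, Nat.one_mul, Nat.add_comm 1 m]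
    exact pvInv_step n m _ hmn (ih (by omega))

-- ===== VERDICT (by name: the statement is the Claim_ definition above) =====
theorem solution_spec : Claim_equal_solution := by
  intro s _ hpre
  unfold Spec_solution solution solution_alt
  simp only []
  set vals := s.map (fun t => (PySem.Int.ofStr? t).getD 0) with hvals
  have hlen : vals.length = s.length := by simp [hvals]
  by_cases hv1 : vals = [1]
  · rw [show s.length + 2 = s.length + 1 + 1 from rfl, pvLoopA_step, if_pos hv1, if_pos hv1]
  · rw [if_neg hv1]
    -- at least one parsed value is nonzero
    obtain ⟨t, ht, htne⟩ := hpre.2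
    have hsome := hpre.1 t ht
    have hmem : ((PySem.Int.ofStr? t).getD 0) ≠ 0 := by
      cases h : PySem.Int.ofStr? t with
      | none => rw [h] at hsome; simp at hsome
      | some v => rw [h] at htne; simp; intro hv; exact htne (by rw [hv])
    have hvmem : ((PySem.Int.ofStr? t).getD 0) ∈ vals := List.mem_map_of_mem ht
    set n := vals.countP (fun v => v != 0) with hn
    have hfilter : (vals.filter (fun x => x != 0)).length = n := by
      rw [hn, List.countP_eq_length_filter]
    have hnpos : 1 ≤ n := by
      rw [← hfilter]
      have : ((PySem.Int.ofStr? t).getD 0) ∈ vals.filter (fun v => v != 0) :=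
        List.mem_filter.mpr ⟨hvmem, by simpa using hmem⟩
      exact List.length_pos_of_mem this
    have hnle : n ≤ s.length := by
      rw [← hfilter, ← hlen]; exact List.length_filter_le _ _
    -- A side: one explicit first round, then the chain closed form
    rw [show s.length + 2 = s.length + 1 + 1 from rfl, pvLoopA_step, if_neg hv1, hfilter]
    have hfuel : pvS n < s.length + 1 := by have := pvS_le n; omega
    simp only [zero_add]
    rw [pvLoopA_closed n hnpos (s.length + 1) 1 _ hfuel]
    -- B side: read the DP tables via the invariant
    have hinv := pvInv_fold n n (le_refl n)
    obtain ⟨-, -, -, -, hk, -⟩ := hinv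
    obtain ⟨-, -, hsteps, hzeros⟩ := hk n (le_refl n)
    rw [hsteps, hzeros]
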